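-- pv_equiv track=rewrite | github.com/DEFRA/ai-eu-trade-accelerator | judit/packages/pipeline/src/judit_pipeline/equine_corpus_workflow.py | _equine_relevance_for_proposition
-- ===== SOURCE A (Python) =====
-- from typing import Any, Literal
--
-- EQUINE_SCOPE_ID = "equine"
--
-- EquineRelevance = Literal["direct", "indirect", "contextual", "none", "unknown"]
--
-- _RELEVANCE_RANK: dict[str, int] = {
--     "direct": 5,
--     "indirect": 4,
--     "contextual": 3,
--     "none": 2,
--     "unknown": 1,
-- }
--
-- def _normalize_equine_relevance(value: str) -> EquineRelevance:
--     v = value.strip().lower()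
--     if v in {"direct", "indirect", "contextual", "none", "unknown"}:
--         return v  # type: ignore[return-value]
--     return "unknown"
--
-- def _pick_relevance(a: EquineRelevance, b: EquineRelevance) -> EquineRelevance:
--     return a if _RELEVANCE_RANK[a] >= _RELEVANCE_RANK[b] else b
--
-- def _equine_relevance_for_proposition(links: list[dict[str, Any]]) -> EquineRelevance:
--     rel: EquineRelevance = "unknown"
--     for link in links:
--         if str(link.get("scope_id") or "") != EQUINE_SCOPE_ID:
--             continue
--         r = _normalize_equine_relevance(str(link.get("relevance") or "unknown"))
--         rel = _pick_relevance(rel, r)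
--     return rel
-- ===== SOURCE B (Python) =====
-- _PRIORITY = ["direct", "indirect", "contextual", "none", "unknown"]
--
-- def _normalize_equine_relevance(value):
--     v = value.strip().lower()
--     if v in {"direct", "indirect", "contextual", "none", "unknown"}:
--         return v
--     return "unknown"
--
-- def _equine_relevance_for_proposition(links):
--     seen = set()
--     for link in links:
--         if str(link.get("scope_id") or "") == "equine":
--             seen.add(_normalize_equine_relevance(str(link.get("relevance") or "unknown")))
--     for label in _PRIORITY:
--         if label in seen:
--             return label
--     return "unknown"
-- ===== Notes on version B (the rewrite author's own statement) =====
-- stated objective: alternative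
-- what changed: Replaces the running max-by-rank fold (pairwise _pick_relevance comparisons against a rank dict) with a two-phase pass: collect the set of normalized labels of scoped links, then return the first label of the fixed priority order present in that set.
import Mathlib
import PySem

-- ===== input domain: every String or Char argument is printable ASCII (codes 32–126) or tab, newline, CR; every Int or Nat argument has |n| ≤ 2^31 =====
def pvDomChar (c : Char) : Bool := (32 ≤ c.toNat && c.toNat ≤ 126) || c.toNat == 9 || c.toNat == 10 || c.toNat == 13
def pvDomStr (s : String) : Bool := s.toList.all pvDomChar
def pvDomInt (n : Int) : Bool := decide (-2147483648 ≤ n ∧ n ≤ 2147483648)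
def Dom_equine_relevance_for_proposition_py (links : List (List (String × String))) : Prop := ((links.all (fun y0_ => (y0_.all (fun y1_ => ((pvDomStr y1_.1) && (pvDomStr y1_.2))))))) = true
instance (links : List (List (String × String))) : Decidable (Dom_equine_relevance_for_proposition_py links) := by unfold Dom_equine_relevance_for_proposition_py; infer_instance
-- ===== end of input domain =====

-- B replaces A's running max-by-rank fold with a set of normalized labels plus a priority-ordered scan; alternative decomposition, same cost.


-- shared helpers (the Python module context both A and B use)
-- dict lookup: first match in the association list (link.get(k))
def pvGet? (link : List (String × String)) (k : String) : Option String :=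
  (link.find? (fun p => p.1 == k)).map (·.2)

-- `x or d` on an Optional[str]: None and "" are falsy
def pvOr (o : Option String) (d : String) : String :=
  match o with
  | none => d
  | some s => if s = "" then d else s

def pvFive : List String := ["direct", "indirect", "contextual", "none", "unknown"]

-- _normalize_equine_relevance
def pvNorm (value : String) : String :=
  let v := PySem.Str.lower (PySem.Str.strip value)
  if pvFive.contains v then v else "unknown"

-- ===== PORT A =====
-- _RELEVANCE_RANK lookup; only reached on the five labels, where it is exact (KeyError unreachable)
def pvRankDict : List (String × Int) :=
  [("direct", 5), ("indirect", 4), ("contextual", 3), ("none", 2), ("unknown", 1)]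

def pvRank (s : String) : Int :=
  (((pvRankDict.find? (fun p => p.1 == s)).map (·.2)).getD 0)

-- _pick_relevance
def pvPick (a b : String) : String := if pvRank a ≥ pvRank b then a else b

def equine_relevance_for_proposition_py (links : List (List (String × String))) : String :=
  links.foldl
    (fun rel link =>
      if pvOr (pvGet? link "scope_id") "" ≠ "equine" then rel
      else pvPick rel (pvNorm (pvOr (pvGet? link "relevance") "unknown")))
    "unknown"

-- ===== PORT B =====
def equine_relevance_for_proposition_py_alt (links : List (List (String × String))) : String :=
  let seen : PySem.Set String :=
    links.foldl
      (fun s link =>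
        if pvOr (pvGet? link "scope_id") "" == "equine" then
          PySem.Set.add s (pvNorm (pvOr (pvGet? link "relevance") "unknown"))
        else s)
      PySem.Set.empty
  (pvFive.find? (fun lbl => PySem.Set.contains seen lbl)).getD "unknown"

-- ===== PRECONDITION & SPEC =====
def Spec_equine_relevance_for_proposition_py (links : List (List (String × String))) (out : String) : Prop := out = equine_relevance_for_proposition_py_alt links
instance (links : List (List (String × String))) (out : String) : Decidable (Spec_equine_relevance_for_proposition_py links out) := by unfold Spec_equine_relevance_for_proposition_py; infer_instance

-- ===== CLAIM (what is proved, stated in full; the proofs are below) =====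
def Claim_equal_equine_relevance_for_proposition_py : Prop := ∀ (links : List (List (String × String))), Dom_equine_relevance_for_proposition_py links → Spec_equine_relevance_for_proposition_py links (equine_relevance_for_proposition_py links)

-- ===== LEMMAS AND PROOFS =====

-- the invariant tying A's running best label to B's growing set
def pvInv (a : String) (s : PySem.Set String) : Prop :=
  a ∈ pvFive ∧
  (pvFive.find? (fun lbl => PySem.Set.contains s lbl)).getD "unknown" = a ∧
  (a = "unknown" ∨ PySem.Set.contains s a = true)

lemma pvNorm_mem (v : String) : pvNorm v ∈ pvFive := by
  unfold pvNorm
  dsimp only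
  split
  · next h => exact List.contains_iff_mem.mp h
  · simp [pvFive]

def pvSel (b1 b2 b3 b4 b5 : Bool) : String :=
  if b1 then "direct" else if b2 then "indirect" else if b3 then "contextual"
  else if b4 then "none" else if b5 then "unknown" else "unknown"

lemma pvPick_cases (a r : String) : pvPick a r = a ∨ pvPick a r = r := by
  unfold pvPick; split <;> simp

lemma pvFind_eq_sel (t : PySem.Set String) :
    (pvFive.find? (fun lbl => PySem.Set.contains t lbl)).getD "unknown" =
      pvSel (PySem.Set.contains t "direct") (PySem.Set.contains t "indirect")
        (PySem.Set.contains t "contextual") (PySem.Set.contains t "none")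
        (PySem.Set.contains t "unknown") := by
  simp only [PySem.Set.contains, pvFive, pvSel, List.find?]
  cases h1 : decide (("direct" : String) ∈ t) <;>
  cases h2 : decide (("indirect" : String) ∈ t) <;>
  cases h3 : decide (("contextual" : String) ∈ t) <;>
  cases h4 : decide (("none" : String) ∈ t) <;>
  cases h5 : decide (("unknown" : String) ∈ t) <;>
    simp [h1, h2, h3, h4, h5]

lemma pvContains_add (s : PySem.Set String) (r lbl : String) :
    PySem.Set.contains (PySem.Set.add s r) lbl = (PySem.Set.contains s lbl || lbl == r) := by
  by_cases hx : lbl = r <;> simp [hx, PySem.Set.contains, PySem.Set.mem_add]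

lemma pvInv_step (a r : String) (s : PySem.Set String)
    (ha : a ∈ pvFive) (hr : r ∈ pvFive)
    (hfind : (pvFive.find? (fun lbl => PySem.Set.contains s lbl)).getD "unknown" = a)
    (hmem : a = "unknown" ∨ PySem.Set.contains s a = true) :
    pvInv (pvPick a r) (PySem.Set.add s r) := by
  refine ⟨?_, ?_, ?_⟩
  · rcases pvPick_cases a r with h | h <;> rw [h]
    · exact ha
    · exact hr
  · rw [pvFind_eq_sel]
    rw [pvFind_eq_sel] at hfind
    subst hfind
    simp only [pvContains_add]
    fin_cases hr <;>
      (generalize PySem.Set.contains s "direct" = b1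
       generalize PySem.Set.contains s "indirect" = b2
       generalize PySem.Set.contains s "contextual" = b3
       generalize PySem.Set.contains s "none" = b4
       generalize PySem.Set.contains s "unknown" = b5
       revert b1 b2 b3 b4 b5
       decide)
  · rcases pvPick_cases a r with h | h <;> rw [h]
    · rcases hmem with h' | h'
      · exact Or.inl h'
      · right; rw [pvContains_add]
        simp only [PySem.Set.contains] at h' ⊢
        simp [List.contains_iff_mem.mp h']
    · right; rw [pvContains_add]; simp

lemma pvInv_loop (links : List (List (String × String))) :
    ∀ (a : String) (s : PySem.Set String), pvInv a s →
    pvInv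
      (links.foldl
        (fun rel link =>
          if pvOr (pvGet? link "scope_id") "" ≠ "equine" then rel
          else pvPick rel (pvNorm (pvOr (pvGet? link "relevance") "unknown"))) a)
      (links.foldl
        (fun s link =>
          if pvOr (pvGet? link "scope_id") "" == "equine" then
            PySem.Set.add s (pvNorm (pvOr (pvGet? link "relevance") "unknown"))
          else s) s) := by
  induction links with
  | nil => intro a s h; exact h
  | cons link t ih =>
      intro a s h
      simp only [List.foldl_cons]
      by_cases hsc : pvOr (pvGet? link "scope_id") "" = "equine"
      · simp only [hsc]
        simp only [ne_eq, not_true_eq_false, if_false, BEq.rfl, if_true]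
        exact ih _ _ (pvInv_step _ _ _ h.1 (pvNorm_mem _) h.2.1 h.2.2)
      · have hb : (pvOr (pvGet? link "scope_id") "" == "equine") = false := by
          simpa using hsc
        simp only [hsc, hb, ne_eq, not_false_eq_true, if_true, Bool.false_eq_true, if_false]
        exact ih _ _ h

-- ===== VERDICT (by name: the statement is the Claim_ definition above) =====
theorem equine_relevance_for_proposition_py_spec : Claim_equal_equine_relevance_for_proposition_py := by
  intro links _
  unfold Spec_equine_relevance_for_proposition_py
  unfold equine_relevance_for_proposition_py equine_relevance_for_proposition_py_alt
  have h0 : pvInv "unknown" PySem.Set.empty := by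
    refine ⟨by simp [pvFive], ?_, Or.inl rfl⟩
    decide
  have h := pvInv_loop links "unknown" PySem.Set.empty h0
  exact (h.2.1).symm
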